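-- pv_equiv track=rewrite | github.com/wyk18703232953/myResearch | codeComplex/data/filteredData/python/quadratic/python_quadratic_0143.py | generate_boards
-- ===== SOURCE A (Python) =====
-- def generate_boards(n):
--     bds = []
--     for k in range(4):
--         board = []
--         for i in range(n):
--             row = []
--             for j in range(n):
--                 row.append((i + j + k) % 2)
--             board.append(row)
--         bds.append(board)
--     return bds
-- ===== SOURCE B (Python) =====
-- def generate_boards(n):
--     base = [[(i + j) % 2 for j in range(n)] for i in range(n)]
--     flip = [[1 - x for x in row] for row in base]
--     bds = []
--     for k in range(4):
--         src = base if k % 2 == 0 else flip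
--         bds.append([row[:] for row in src])
--     return bds
-- ===== Notes on version B (the rewrite author's own statement) =====
-- stated objective: simpler
-- what changed: B computes the parity board (i+j)%2 once and derives all four boards by copying it or its complement (k even/odd), instead of A's triple loop recomputing (i+j+k)%2 for every cell of every board.
import Mathlib
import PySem

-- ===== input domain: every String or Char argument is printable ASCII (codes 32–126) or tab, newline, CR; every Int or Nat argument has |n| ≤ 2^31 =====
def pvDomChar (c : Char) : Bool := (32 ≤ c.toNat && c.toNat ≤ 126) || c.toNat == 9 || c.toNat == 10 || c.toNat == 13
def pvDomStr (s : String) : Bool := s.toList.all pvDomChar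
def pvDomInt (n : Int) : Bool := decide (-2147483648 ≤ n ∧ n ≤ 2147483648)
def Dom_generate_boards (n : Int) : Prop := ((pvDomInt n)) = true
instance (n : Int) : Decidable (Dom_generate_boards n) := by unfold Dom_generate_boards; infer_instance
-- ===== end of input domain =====

-- B computes the parity board (i+j)%2 once and derives all four boards by copy or complement
-- (k even/odd) instead of A's triple loop recomputing (i+j+k)%2 per cell — objective: simpler.

-- ===== PORT A =====
def generate_boards (n : Int) : List (List (List Int)) :=
  (PySem.List.pyRange 0 4 1).foldl (fun bds k =>
    bds ++ [(PySem.List.pyRange 0 n 1).foldl (fun board i =>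
      board ++ [(PySem.List.pyRange 0 n 1).foldl (fun row j =>
        row ++ [PySem.Int.mod (i + j + k) 2]) []]) []]) []

-- ===== PORT B =====
def generate_boards_alt (n : Int) : List (List (List Int)) :=
  let base := (PySem.List.pyRange 0 n 1).map (fun i =>
    (PySem.List.pyRange 0 n 1).map (fun j => PySem.Int.mod (i + j) 2))
  let flip := base.map (fun row => row.map (fun x => 1 - x))
  (PySem.List.pyRange 0 4 1).foldl (fun bds k =>
    let src := if PySem.Int.mod k 2 == 0 then base else flip
    -- row[:] is a value-level identity copy
    bds ++ [src.map (fun row => row)]) []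

-- ===== PRECONDITION & SPEC =====
def Spec_generate_boards (n : Int) (out : List (List (List Int))) : Prop := out = generate_boards_alt n
instance (n : Int) (out : List (List (List Int))) : Decidable (Spec_generate_boards n out) := by unfold Spec_generate_boards; infer_instance

-- ===== CLAIM (what is proved, stated in full; the proofs are below) =====
def Claim_equal_generate_boards : Prop := ∀ (n : Int), Dom_generate_boards n → Spec_generate_boards n (generate_boards n)

-- ===== LEMMAS AND PROOFS =====
theorem pv_mod1 (a : Int) : (a + 1) % 2 = 1 - a % 2 := by omega
theorem pv_mod2 (a : Int) : (a + 2) % 2 = a % 2 := by omega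
theorem pv_mod3 (a : Int) : (a + 3) % 2 = 1 - a % 2 := by omega

theorem pv_main (n : Int) : generate_boards n = generate_boards_alt n := by
  have h4 : PySem.List.pyRange 0 4 1 = [0, 1, 2, 3] := by decide
  simp only [generate_boards, generate_boards_alt, h4,
    PySem.List.foldl_append_singleton_eq_map, List.nil_append, List.map_map,
    PySem.Int.mod_eq_emod_of_pos (by norm_num : (0:Int) < 2)]
  norm_num [List.append_assoc, Function.comp, pv_mod1, pv_mod2, pv_mod3]

-- ===== VERDICT (by name: the statement is the Claim_ definition above) =====
theorem generate_boards_spec : Claim_equal_generate_boards := by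
  intro n _
  exact pv_main n
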